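-- pv_equiv track=rewrite | github.com/felrock/adventofcode | dec6/both.py | isEnclosed
-- ===== SOURCE A (Python) =====
-- def isEnclosed(name, grid):
--     '''
--     Checks if that for any given node in grid its possible
--     to make a step in any direction without going out of
--     bounds
--     '''
--
--     # bounds
--     ylb = 0
--     xlb = 0
--     yhb = len(grid)-1
--     xhb = len(grid[0])-1
--
--     for i in range(len(grid)):
--
--         for j in range(len(grid[0])):
--
--             if grid[i][j] == name:
--
--                 if i+1 > yhb or i-1 < ylb or j+1 > xhb or j-1 < xlb:
--
--                     return False
--     return True
-- ===== SOURCE B (Python) =====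
-- def isEnclosed(name, grid):
--     w = len(grid[0])
--     if w == 0:
--         return True
--     if name in grid[0] or name in grid[-1][:w]:
--         return False
--     return all(row[0] != name and row[w - 1] != name for row in grid)
-- ===== Notes on version B (the rewrite author's own statement) =====
-- stated objective: alternative
-- what changed: Instead of scanning every cell of the grid and testing whether its indices are on the boundary, B scans only the boundary itself: the top row, the first w entries of the bottom row, and the first and last column entry of each row; asymptotically lighter (O(n+m) vs O(n*m)) but A's early return makes measured gains input-dependent, so no speed is claimed.
-- outside the precondition, e.g. on isEnclosed('a', [['b', 'b'], ['a', 'b'], ['b']]): A returns False, B returns False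
import Mathlib
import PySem

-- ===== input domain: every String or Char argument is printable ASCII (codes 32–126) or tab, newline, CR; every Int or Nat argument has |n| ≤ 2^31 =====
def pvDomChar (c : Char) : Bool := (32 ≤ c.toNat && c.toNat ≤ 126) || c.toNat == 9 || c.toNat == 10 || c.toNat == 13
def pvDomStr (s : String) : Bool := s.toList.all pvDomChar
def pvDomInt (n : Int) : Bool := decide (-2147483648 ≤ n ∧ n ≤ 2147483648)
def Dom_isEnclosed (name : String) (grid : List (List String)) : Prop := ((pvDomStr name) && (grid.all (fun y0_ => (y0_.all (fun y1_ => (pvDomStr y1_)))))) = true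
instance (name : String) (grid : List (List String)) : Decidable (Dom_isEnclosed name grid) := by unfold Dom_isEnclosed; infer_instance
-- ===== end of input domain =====

-- B scans only the boundary (top row, bottom row, first/last column) instead of
-- every cell of the grid; equivalence of return values is proved on the inputs
-- admitted by Pre_ below.

-- ===== PORT A =====
-- literal transliteration of A: nested loops over all (i, j); early `return False`
-- is the `any`; grid[i][j] is in range on every input admitted by Pre_.
def isEnclosed (name : String) (grid : List (List String)) : Bool :=
  let yhb : Int := (grid.length : Int) - 1
  let xhb : Int := ((grid.headD []).length : Int) - 1
  !((List.range grid.length).any (fun i =>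
      (List.range (grid.headD []).length).any (fun j =>
        ((grid.getD i []).getD j "" == name) &&
        (decide ((i : Int) + 1 > yhb) || decide ((i : Int) - 1 < 0) ||
         decide ((j : Int) + 1 > xhb) || decide ((j : Int) - 1 < 0)))))

-- ===== PORT B =====
-- literal transliteration of Source B: boundary-only scan.
def isEnclosed_alt (name : String) (grid : List (List String)) : Bool :=
  let w := (grid.headD []).length
  if w = 0 then true
  else if (grid.headD []).contains name || ((grid.getLastD []).take w).contains name then
    false
  else
    grid.all (fun row => !(row.getD 0 "" == name) && !(row.getD (w - 1) "" == name))

-- ===== PRECONDITION & SPEC =====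
-- A raises IndexError on the empty grid (grid[0]) and may raise on grids with a
-- row shorter than the first row (grid[i][j] for j < len(grid[0])); Pre_ keeps the
-- grids where A surely returns: nonempty and either name occurs in row 0 (A
-- returns False while still scanning row 0) or every row is at least as long as
-- row 0. Excluded besides the raising inputs are ragged grids where whether A
-- returns or raises depends on its scan position (a cite is in claim.json).
def Pre_isEnclosed (name : String) (grid : List (List String)) : Prop :=
  grid ≠ [] ∧ (name ∈ grid.headD [] ∨ ∀ row ∈ grid, (grid.headD []).length ≤ row.length)
instance (name : String) (grid : List (List String)) : Decidable (Pre_isEnclosed name grid) := by unfold Pre_isEnclosed; infer_instance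

def pvWitness_isEnclosed : String × List (List String) := ("a", [["b", "b"], ["b", "a"]])

def Spec_isEnclosed (name : String) (grid : List (List String)) (out : Bool) : Prop := out = isEnclosed_alt name grid
instance (name : String) (grid : List (List String)) (out : Bool) : Decidable (Spec_isEnclosed name grid out) := by unfold Spec_isEnclosed; infer_instance

-- ===== CLAIM (what is proved, stated in full; the proofs are below) =====
def Claim_equal_isEnclosed : Prop := ∀ (name : String) (grid : List (List String)), Dom_isEnclosed name grid → Pre_isEnclosed name grid → Spec_isEnclosed name grid (isEnclosed name grid)

-- ===== LEMMAS AND PROOFS =====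

-- A cell of `name` on the boundary (restricted to the first w columns).
def BadCell (name : String) (grid : List (List String)) : Prop :=
  ∃ i < grid.length, ∃ j < (grid.headD []).length,
    (grid.getD i []).getD j "" = name ∧
    (i = 0 ∨ i + 1 = grid.length ∨ j = 0 ∨ j + 1 = (grid.headD []).length)

lemma A_false_iff (name : String) (grid : List (List String)) :
    isEnclosed name grid = false ↔ BadCell name grid := by
  simp only [isEnclosed, Bool.not_eq_false', List.any_eq_true, List.mem_range,
    Bool.and_eq_true, Bool.or_eq_true, decide_eq_true_eq, beq_iff_eq, BadCell]
  constructor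
  · rintro ⟨i, hi, j, hj, hn, hc⟩
    exact ⟨i, hi, j, hj, hn, by omega⟩
  · rintro ⟨i, hi, j, hj, hn, hc⟩
    exact ⟨i, hi, j, hj, hn, by omega⟩

lemma getLastD_eq_getD (grid : List (List String)) :
    grid.getLastD [] = grid.getD (grid.length - 1) [] := by
  simp [List.getLastD_eq_getLast?, List.getLast?_eq_getElem?, List.getD_eq_getElem?_getD]

lemma mem_take_iff (l : List String) (a : String) (w : Nat) (hw : w ≤ l.length) :
    a ∈ l.take w ↔ ∃ j, ∃ h : j < w, l[j]'(by omega) = a := by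
  rw [List.mem_iff_getElem]
  constructor
  · rintro ⟨j, hj, he⟩
    rw [List.length_take] at hj
    exact ⟨j, by omega, by rw [← List.getElem_take]; exact he⟩
  · rintro ⟨j, hj, he⟩
    exact ⟨j, by simp [List.length_take]; omega, by rw [List.getElem_take]; exact he⟩

lemma B_false_iff (name : String) (grid : List (List String)) (hne : grid ≠ [])
    (hrows : ∀ row ∈ grid, (grid.headD []).length ≤ row.length) :
    isEnclosed_alt name grid = false ↔ BadCell name grid := by
  have hh : 0 < grid.length := List.length_pos_of_ne_nil hne
  have htop : grid.headD [] = grid.getD 0 [] := by cases grid <;> rfl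
  have hbot : grid.getLastD [] = grid.getD (grid.length - 1) [] := getLastD_eq_getD grid
  have hbotmem : grid.getLastD [] ∈ grid := by
    rw [hbot, List.getD_eq_getElem _ _ (by omega)]; exact List.getElem_mem _
  have hbotlen : (grid.headD []).length ≤ (grid.getLastD []).length := hrows _ hbotmem
  unfold isEnclosed_alt BadCell
  by_cases hw0 : (grid.headD []).length = 0
  · simp only [hw0]
    constructor
    · intro h; cases h
    · rintro ⟨i, hi, j, hj, _⟩; omega
  · rw [if_neg hw0]
    split_ifs with hc
    · simp only [true_iff]
      rw [Bool.or_eq_true] at hc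
      rcases hc with hc | hc
      · rw [List.contains_iff_mem, List.mem_iff_getElem] at hc
        obtain ⟨j, hj, he⟩ := hc
        refine ⟨0, hh, j, hj, ?_, Or.inl rfl⟩
        rw [← htop, List.getD_eq_getElem _ _ hj]; exact he
      · rw [List.contains_iff_mem, mem_take_iff _ _ _ hbotlen] at hc
        obtain ⟨j, hj, he⟩ := hc
        refine ⟨grid.length - 1, by omega, j, hj, ?_, Or.inr (Or.inl (by omega))⟩
        rw [← hbot]
        rw [List.getD_eq_getElem _ _ (Nat.lt_of_lt_of_le hj hbotlen)]
        exact he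
    · rw [Bool.or_eq_true, not_or] at hc
      obtain ⟨hct, hcb⟩ := hc
      rw [List.all_eq_false]
      constructor
      · rintro ⟨row, hrow, hbad⟩
        simp only [Bool.and_eq_true, Bool.not_eq_true', beq_eq_false_iff_ne, ne_eq,
          not_and_or, not_not] at hbad
        obtain ⟨i, hi, hrowi⟩ := List.mem_iff_getElem.mp hrow
        have hlen : (grid.headD []).length ≤ row.length := hrows row hrow
        rcases hbad with hb | hb
        · exact ⟨i, hi, 0, by omega,
            by rw [List.getD_eq_getElem _ _ hi, hrowi]; exact hb,
            Or.inr (Or.inr (Or.inl rfl))⟩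
        · exact ⟨i, hi, (grid.headD []).length - 1, by omega,
            by rw [List.getD_eq_getElem _ _ hi, hrowi]; exact hb,
            Or.inr (Or.inr (Or.inr (by omega)))⟩
      · rintro ⟨i, hi, j, hj, hn, hcase⟩
        have himem : grid.getD i [] ∈ grid := by
          rw [List.getD_eq_getElem _ _ hi]; exact List.getElem_mem _
        have hleni : (grid.headD []).length ≤ (grid.getD i []).length := hrows _ himem
        rcases hcase with h0 | hlast | hj0 | hjw
        · exfalso
          apply hct
          rw [List.contains_iff_mem, List.mem_iff_getElem]
          refine ⟨j, hj, ?_⟩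
          rw [h0, ← htop, List.getD_eq_getElem _ _ hj] at hn
          exact hn
        · exfalso
          apply hcb
          rw [List.contains_iff_mem, mem_take_iff _ _ _ hbotlen]
          refine ⟨j, hj, ?_⟩
          rw [show i = grid.length - 1 from by omega, ← hbot,
             List.getD_eq_getElem _ _ (Nat.lt_of_lt_of_le hj hbotlen)] at hn
          exact hn
        · refine ⟨grid.getD i [], himem, ?_⟩
          simp only [Bool.and_eq_true, Bool.not_eq_true', beq_eq_false_iff_ne, ne_eq,
            not_and_or, not_not]
          exact Or.inl (by rw [← hj0]; exact hn)
        · refine ⟨grid.getD i [], himem, ?_⟩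
          simp only [Bool.and_eq_true, Bool.not_eq_true', beq_eq_false_iff_ne, ne_eq,
            not_and_or, not_not]
          exact Or.inr (by rw [show (grid.headD []).length - 1 = j from by omega]; exact hn)

theorem isEnclosed_spec : Claim_equal_isEnclosed := by
  intro name grid _dom pre
  unfold Spec_isEnclosed
  obtain ⟨hne, hpre⟩ := pre
  rcases hpre with htopmem | hrows
  · -- name occurs in row 0: both programs return false
    have hh : 0 < grid.length := List.length_pos_of_ne_nil hne
    have hw0 : (grid.headD []).length ≠ 0 := by
      have := List.length_pos_of_ne_nil (List.ne_nil_of_mem htopmem); omega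
    have hA : isEnclosed name grid = false := by
      apply (A_false_iff name grid).mpr
      obtain ⟨j, hj, he⟩ := List.mem_iff_getElem.mp htopmem
      refine ⟨0, hh, j, hj, ?_, Or.inl rfl⟩
      rw [show grid.getD 0 [] = grid.headD [] from by cases grid <;> rfl,
          List.getD_eq_getElem _ _ hj]
      exact he
    have hB : isEnclosed_alt name grid = false := by
      simp only [isEnclosed_alt, if_neg hw0]
      rw [if_pos]
      rw [Bool.or_eq_true, List.contains_iff_mem]
      exact Or.inl htopmem
    rw [hA, hB]
  · by_cases hb : BadCell name grid
    · rw [(A_false_iff name grid).mpr hb, ((B_false_iff name grid hne hrows).mpr hb).symm]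
    · have ha : isEnclosed name grid ≠ false := fun h => hb ((A_false_iff name grid).mp h)
      have hbn : isEnclosed_alt name grid ≠ false := fun h => hb ((B_false_iff name grid hne hrows).mp h)
      simp only [Bool.not_eq_false] at ha hbn
      rw [ha, hbn]
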